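-- pv_equiv track=rewrite | github.com/tqmsh/LC | Array & Strings/Find Largest Numbers.py | find_largest_m_elements_reverse_sorted
-- ===== SOURCE A (Python) =====
-- from heapq import heappush, heapreplace
--
-- def find_largest_m_elements_reverse_sorted(lists, M):
--     pq = []
--
--     for lst in lists:
--         for num in lst[:M]:
--             if len(pq) < M:
--                 heappush(pq, num)
--             else:
--                 if num > pq[0]: heapreplace(pq, num)
--
--
--     return sorted(pq)
-- ===== SOURCE B (Python) =====
-- def find_largest_m_elements_reverse_sorted(lists, M):
--     cand = []
--     for lst in lists:
--         cand += lst[:M]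
--     return sorted(cand)[-M:]
-- ===== Notes on version B (the rewrite author's own statement) =====
-- stated objective: simpler
-- what changed: Replaces the incremental heapq min-heap top-M selection (push/replace per element) by concatenating all lst[:M] prefixes, sorting the flat candidate list once, and returning its last M elements by slicing.
import Mathlib
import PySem

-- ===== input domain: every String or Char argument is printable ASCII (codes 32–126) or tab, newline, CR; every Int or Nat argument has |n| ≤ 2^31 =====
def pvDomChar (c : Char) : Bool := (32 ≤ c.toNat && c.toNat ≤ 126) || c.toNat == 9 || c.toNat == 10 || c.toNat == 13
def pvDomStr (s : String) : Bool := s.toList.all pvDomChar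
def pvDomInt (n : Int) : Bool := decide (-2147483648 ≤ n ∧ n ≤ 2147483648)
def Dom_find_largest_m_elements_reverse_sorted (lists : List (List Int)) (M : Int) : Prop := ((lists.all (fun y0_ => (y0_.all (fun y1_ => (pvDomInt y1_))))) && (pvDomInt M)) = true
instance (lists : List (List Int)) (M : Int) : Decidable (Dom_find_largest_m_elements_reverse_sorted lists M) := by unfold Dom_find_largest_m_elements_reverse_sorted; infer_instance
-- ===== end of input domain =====

-- B replaces A's incremental heapq top-M selection by one flat concatenation, a single full sort and a tail slice (simpler).

-- ===== PORT A =====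
-- CPython heapq._siftdown(heap, 0, pos) with the saved `newitem` as a parameter; every
-- A-side call has startpos = 0, so the loop guard `pos > startpos` is `0 < pos`.
def pvSiftdownLoop (l : List Int) (newitem : Int) (pos : Nat) : List Int :=
  if h : 0 < pos then
    let parentpos := (pos - 1) / 2
    let parent := l.getD parentpos 0
    if newitem < parent then pvSiftdownLoop (l.set pos parent) newitem parentpos
    else l.set pos newitem
  else l.set pos newitem
termination_by pos
decreasing_by simpa using Nat.div_lt_of_lt_mul (by omega)

-- heapq.heappush: append, then sift the new leaf towards the root
def pvHeappush (heap : List Int) (item : Int) : List Int :=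
  pvSiftdownLoop (heap ++ [item]) item heap.length

-- the child-promotion while-loop of CPython heapq._siftup; returns (heap, final pos)
def pvSiftupLoop (endpos : Nat) (l : List Int) (pos : Nat) : List Int × Nat :=
  if h : 2 * pos + 1 < endpos then
    let c0 := 2 * pos + 1
    let c := if c0 + 1 < endpos ∧ ¬ (l.getD c0 0 < l.getD (c0 + 1) 0) then c0 + 1 else c0
    pvSiftupLoop endpos (l.set pos (l.getD c 0)) c
  else (l, pos)
termination_by endpos - pos
decreasing_by split_ifs <;> omega

-- heapq.heapreplace: overwrite the root, then _siftup(heap, 0)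
def pvHeapreplace (heap : List Int) (item : Int) : List Int :=
  let h0 := heap.set 0 item
  let hp := pvSiftupLoop h0.length h0 0
  pvSiftdownLoop hp.1 item hp.2

-- loop body of A: `if len(pq) < M: heappush(pq, num) elif num > pq[0]: heapreplace(pq, num)`
def pvStep (M : Int) (pq : List Int) (num : Int) : List Int :=
  if (pq.length : Int) < M then pvHeappush pq num
  else if PySem.List.pyGetD pq 0 0 < num then pvHeapreplace pq num
  else pq

def find_largest_m_elements_reverse_sorted (lists : List (List Int)) (M : Int) : List Int :=
  PySem.List.sorted
    (lists.foldl (fun pq lst => (PySem.List.slice lst none (some M)).foldl (pvStep M) pq) [])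
    (fun x => x) false

-- ===== PORT B =====
def find_largest_m_elements_reverse_sorted_alt (lists : List (List Int)) (M : Int) : List Int :=
  PySem.List.slice
    (PySem.List.sorted
      (lists.foldl (fun cand lst => cand ++ PySem.List.slice lst none (some M)) [])
      (fun x => x) false)
    (some (-M)) none

-- ===== PRECONDITION & SPEC =====
-- Pre_ excludes exactly the inputs where A raises IndexError (`pq[0]` on the empty heap):
-- M < 0 together with some list longer than -M.
def Pre_find_largest_m_elements_reverse_sorted (lists : List (List Int)) (M : Int) : Prop :=
  0 ≤ M ∨ ∀ l ∈ lists, (l.length : Int) ≤ -M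
instance (lists : List (List Int)) (M : Int) : Decidable (Pre_find_largest_m_elements_reverse_sorted lists M) := by unfold Pre_find_largest_m_elements_reverse_sorted; infer_instance
def pvWitness_find_largest_m_elements_reverse_sorted : List (List Int) × Int := ([[1, 3], [2]], 2)

def Spec_find_largest_m_elements_reverse_sorted (lists : List (List Int)) (M : Int) (out : List Int) : Prop := out = find_largest_m_elements_reverse_sorted_alt lists M
instance (lists : List (List Int)) (M : Int) (out : List Int) : Decidable (Spec_find_largest_m_elements_reverse_sorted lists M out) := by unfold Spec_find_largest_m_elements_reverse_sorted; infer_instance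

-- ===== CLAIM (what is proved, stated in full; the proofs are below) =====
def Claim_equal_find_largest_m_elements_reverse_sorted : Prop := ∀ (lists : List (List Int)) (M : Int), Dom_find_largest_m_elements_reverse_sorted lists M → Pre_find_largest_m_elements_reverse_sorted lists M → Spec_find_largest_m_elements_reverse_sorted lists M (find_largest_m_elements_reverse_sorted lists M)

-- ===== LEMMAS AND PROOFS =====

-- abbreviation for Python's key-less ascending sort
def sortedId (xs : List Int) : List Int := PySem.List.sorted xs (fun x => x) false

-- binary-heap invariant: every non-root entry is ≥ its parent
def IsHeap (l : List Int) : Prop :=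
  ∀ j, 0 < j → j < l.length → l.getD ((j - 1) / 2) 0 ≤ l.getD j 0

-- heap invariant away from a hole at `pos`
def HeapExcept (l : List Int) (pos : Nat) : Prop :=
  ∀ j, 0 < j → j < l.length → j ≠ pos → (j - 1) / 2 ≠ pos → l.getD ((j - 1) / 2) 0 ≤ l.getD j 0

-- the value x destined for the hole is ≤ both children of the hole
def ChildrenGe (l : List Int) (pos : Nat) (x : Int) : Prop :=
  ∀ j, j < l.length → 0 < j → (j - 1) / 2 = pos → x ≤ l.getD j 0

-- the hole's parent is ≤ both children of the hole
def BridgeGe (l : List Int) (pos : Nat) : Prop :=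
  ∀ j, j < l.length → 0 < j → (j - 1) / 2 = pos → 0 < pos → l.getD ((pos - 1) / 2) 0 ≤ l.getD j 0

theorem swap_set_perm (t : List Int) : ∀ (i : Nat) (a d : Int), i < t.length → (d :: t.set i a).Perm (a :: t.set i d) := by
  induction t with
  | nil => intro i a d h; simp at h
  | cons b t ih =>
    intro i a d h
    cases i with
    | zero => exact List.Perm.swap a d t
    | succ i =>
      simp only [List.set_cons_succ]
      exact ((List.Perm.swap b d _).trans ((ih i a d (by simpa using h)).cons b)).trans (List.Perm.swap a b _)

theorem getD_set' (l : List Int) (i j : Nat) (a : Int) :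
    (l.set i a).getD j 0 = if i = j ∧ j < l.length then a else l.getD j 0 := by
  simp only [List.getD_eq_getElem?_getD, List.getElem?_set]
  split_ifs with h1 h2 h3 <;> simp_all

theorem getD_set_ne (l : List Int) (i j : Nat) (a : Int) (h : i ≠ j) :
    (l.set i a).getD j 0 = l.getD j 0 := by
  rw [getD_set']; simp [h]

theorem getD_set_self (l : List Int) (i : Nat) (a : Int) (h : i < l.length) :
    (l.set i a).getD i 0 = a := by
  rw [getD_set']; simp [h]

theorem set_getD_self (l : List Int) (i : Nat) (h : i < l.length) : l.set i (l.getD i 0) = l := by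
  apply List.ext_getElem?
  intro j
  rw [List.getElem?_set]
  split_ifs with h1
  · subst h1; simp [List.getD_eq_getElem?_getD, List.getElem?_eq_getElem h]
  · rfl

theorem move1 : ∀ (l : List Int) (p q : Nat) (d : Int), p < q → q < l.length →
    ((l.set q (l.getD p 0)).set p d).Perm (l.set q d) := by
  intro l
  induction l with
  | nil => intro p q d h hq; simp at hq
  | cons b t ih =>
    intro p q d h hq
    cases q with
    | zero => omega
    | succ q =>
      cases p with
      | zero =>
        simp only [List.set_cons_succ, List.getD_cons_zero, List.set_cons_zero]
        exact swap_set_perm t q b d (by simpa using hq)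
      | succ p =>
        simp only [List.set_cons_succ, List.getD_cons_succ]
        exact (ih p q d (by omega) (by simpa using hq)).cons b

theorem move2 : ∀ (l : List Int) (p q : Nat) (d : Int), p < q → q < l.length →
    ((l.set p (l.getD q 0)).set q d).Perm (l.set p d) := by
  intro l
  induction l with
  | nil => intro p q d h hq; simp at hq
  | cons b t ih =>
    intro p q d h hq
    cases q with
    | zero => omega
    | succ q =>
      cases p with
      | zero =>
        simp only [List.set_cons_succ, List.getD_cons_succ, List.set_cons_zero]
        have h1 : q < t.length := by simpa using hq
        have hs := swap_set_perm t q d (t.getD q 0) h1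
        rw [set_getD_self t q h1] at hs
        exact hs
      | succ p =>
        simp only [List.set_cons_succ, List.getD_cons_succ]
        exact (ih p q d (by omega) (by simpa using hq)).cons b

theorem sdl_eq_pos (l : List Int) (x : Int) (pos : Nat) (h : 0 < pos) :
    pvSiftdownLoop l x pos =
      if x < l.getD ((pos - 1) / 2) 0
      then pvSiftdownLoop (l.set pos (l.getD ((pos - 1) / 2) 0)) x ((pos - 1) / 2)
      else l.set pos x := by
  rw [pvSiftdownLoop]
  simp only [dif_pos h]

theorem sdl_eq_zero (l : List Int) (x : Int) : pvSiftdownLoop l x 0 = l.set 0 x := by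
  rw [pvSiftdownLoop]
  simp

theorem sul_eq_lt (n : Nat) (l : List Int) (pos : Nat) (h : 2 * pos + 1 < n) :
    pvSiftupLoop n l pos =
      pvSiftupLoop n
        (l.set pos (l.getD (if 2 * pos + 1 + 1 < n ∧ ¬ (l.getD (2 * pos + 1) 0 < l.getD (2 * pos + 1 + 1) 0) then 2 * pos + 1 + 1 else 2 * pos + 1) 0))
        (if 2 * pos + 1 + 1 < n ∧ ¬ (l.getD (2 * pos + 1) 0 < l.getD (2 * pos + 1 + 1) 0) then 2 * pos + 1 + 1 else 2 * pos + 1) := by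
  rw [pvSiftupLoop]
  simp only [dif_pos h]

theorem sul_eq_ge (n : Nat) (l : List Int) (pos : Nat) (h : ¬ 2 * pos + 1 < n) :
    pvSiftupLoop n l pos = (l, pos) := by
  rw [pvSiftupLoop]
  simp [h]

theorem sdl_perm (x : Int) : ∀ (pos : Nat) (l : List Int), pos < l.length →
    (pvSiftdownLoop l x pos).Perm (l.set pos x) := by
  intro pos
  induction pos using Nat.strong_induction_on with
  | _ pos ih =>
    intro l hl
    by_cases h0 : 0 < pos
    · rw [sdl_eq_pos l x pos h0]
      by_cases hlt : x < l.getD ((pos - 1) / 2) 0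
      · rw [if_pos hlt]
        have hq : (pos - 1) / 2 < pos := by omega
        have h1 := ih ((pos - 1) / 2) hq (l.set pos (l.getD ((pos - 1) / 2) 0)) (by rw [List.length_set]; omega)
        exact h1.trans (move1 l ((pos - 1) / 2) pos x hq hl)
      · rw [if_neg hlt]
    · have h0' : pos = 0 := by omega
      subst h0'
      rw [sdl_eq_zero]

theorem sdl_heap (x : Int) : ∀ (pos : Nat) (l : List Int), pos < l.length →
    HeapExcept l pos → ChildrenGe l pos x → BridgeGe l pos →
    IsHeap (pvSiftdownLoop l x pos) := by
  intro pos
  induction pos using Nat.strong_induction_on with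
  | _ pos ih =>
    intro l hl hP hQ hR
    by_cases h0 : 0 < pos
    · rw [sdl_eq_pos l x pos h0]
      by_cases hlt : x < l.getD ((pos - 1) / 2) 0
      · rw [if_pos hlt]
        have hql : (pos - 1) / 2 < l.length := by omega
        have hP' : HeapExcept (l.set pos (l.getD ((pos - 1) / 2) 0)) ((pos - 1) / 2) := by
          intro j hj0 hjlen hjq hjpq
          rw [List.length_set] at hjlen
          by_cases hjpos : j = pos
          · subst hjpos; exact absurd rfl hjpq
          · rw [getD_set_ne l pos j _ (by omega)]
            by_cases hpj : (j - 1) / 2 = pos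
            · rw [hpj, getD_set_self l pos _ hl]
              exact hR j hjlen hj0 hpj h0
            · rw [getD_set_ne l pos _ _ (by omega)]
              exact hP j hj0 hjlen hjpos hpj
        have hQ' : ChildrenGe (l.set pos (l.getD ((pos - 1) / 2) 0)) ((pos - 1) / 2) x := by
          intro j hjlen hj0 hpjq
          rw [List.length_set] at hjlen
          by_cases hjpos : j = pos
          · subst hjpos; rw [getD_set_self l j _ hl]; exact le_of_lt hlt
          · rw [getD_set_ne l pos j _ (by omega)]
            have h1 := hP j hj0 hjlen hjpos (by omega)
            rw [hpjq] at h1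
            exact (le_of_lt hlt).trans h1
        have hR' : BridgeGe (l.set pos (l.getD ((pos - 1) / 2) 0)) ((pos - 1) / 2) := by
          intro j hjlen hj0 hpjq hq0
          rw [List.length_set] at hjlen
          have hparent : l.getD (((pos - 1) / 2 - 1) / 2) 0 ≤ l.getD ((pos - 1) / 2) 0 :=
            hP ((pos - 1) / 2) hq0 hql (by omega) (by omega)
          rw [getD_set_ne l pos (((pos - 1) / 2 - 1) / 2) _ (by omega)]
          by_cases hjpos : j = pos
          · subst hjpos; rw [getD_set_self l j _ hl]; exact hparent
          · rw [getD_set_ne l pos j _ (by omega)]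
            have h2 := hP j hj0 hjlen hjpos (by omega)
            rw [hpjq] at h2
            exact hparent.trans h2
        exact ih ((pos - 1) / 2) (by omega) _ (by rw [List.length_set]; omega) hP' hQ' hR'
      · rw [if_neg hlt]
        intro j hj0 hjlen
        rw [List.length_set] at hjlen
        by_cases hjpos : j = pos
        · subst hjpos
          rw [getD_set_ne l j _ _ (by omega), getD_set_self l j _ hl]
          exact not_lt.mp hlt
        · by_cases hpj : (j - 1) / 2 = pos
          · rw [hpj, getD_set_self l pos _ hl, getD_set_ne l pos j _ (by omega)]
            exact hQ j hjlen hj0 hpj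
          · rw [getD_set_ne l pos _ _ (by omega), getD_set_ne l pos j _ (by omega)]
            exact hP j hj0 hjlen hjpos hpj
    · have h0' : pos = 0 := by omega
      subst h0'
      rw [sdl_eq_zero]
      intro j hj0 hjlen
      rw [List.length_set] at hjlen
      by_cases hpj : (j - 1) / 2 = 0
      · rw [hpj, getD_set_self l 0 _ hl, getD_set_ne l 0 j _ (by omega)]
        exact hQ j hjlen hj0 hpj
      · rw [getD_set_ne l 0 _ _ (by omega), getD_set_ne l 0 j _ (by omega)]
        exact hP j hj0 hjlen (by omega) hpj

theorem sul_spec : ∀ (k : Nat) (n : Nat) (pos : Nat) (l : List Int), n - pos ≤ k → pos < l.length → l.length = n →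
    HeapExcept l pos → BridgeGe l pos →
    (pvSiftupLoop n l pos).1.length = l.length ∧
    (pvSiftupLoop n l pos).2 < (pvSiftupLoop n l pos).1.length ∧
    ¬ (2 * (pvSiftupLoop n l pos).2 + 1 < (pvSiftupLoop n l pos).1.length) ∧
    HeapExcept (pvSiftupLoop n l pos).1 (pvSiftupLoop n l pos).2 ∧
    BridgeGe (pvSiftupLoop n l pos).1 (pvSiftupLoop n l pos).2 ∧
    (∀ d, ((pvSiftupLoop n l pos).1.set (pvSiftupLoop n l pos).2 d).Perm (l.set pos d)) := by
  intro k
  induction k with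
  | zero => intro n pos l hk hl hn _ _; omega
  | succ k ih =>
    intro n pos l hk hl hn hP hS
    by_cases hc : 2 * pos + 1 < n
    · rw [sul_eq_lt n l pos hc]
      set c := if 2 * pos + 1 + 1 < n ∧ ¬ (l.getD (2 * pos + 1) 0 < l.getD (2 * pos + 1 + 1) 0) then 2 * pos + 1 + 1 else 2 * pos + 1 with hcdef
      have hcb : (c = 2 * pos + 1) ∨ (c = 2 * pos + 1 + 1 ∧ 2 * pos + 1 + 1 < n) := by
        rw [hcdef]; split_ifs with h
        · exact Or.inr ⟨rfl, h.1⟩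
        · exact Or.inl rfl
      have hcn : c < n := by rcases hcb with h | h <;> omega
      have hcpos : pos < c := by rcases hcb with h | h <;> omega
      have hcp : (c - 1) / 2 = pos := by rcases hcb with h | h <;> omega
      have hmin : ∀ s, s < n → 0 < s → (s - 1) / 2 = pos → l.getD c 0 ≤ l.getD s 0 := by
        intro s hs hs0 hsp
        have hs' : s = 2 * pos + 1 ∨ s = 2 * pos + 1 + 1 := by omega
        rw [hcdef]
        split_ifs with h
        · rcases hs' with rfl | rfl
          · exact not_lt.mp h.2
          · exact le_refl _
        · rcases hs' with rfl | rfl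
          · exact le_refl _
          · have hlr : l.getD (2 * pos + 1) 0 < l.getD (2 * pos + 1 + 1) 0 := by
              by_contra hnot
              exact h ⟨hs, hnot⟩
            exact le_of_lt hlr
      have hP' : HeapExcept (l.set pos (l.getD c 0)) c := by
        intro j hj0 hjlen hjc hjpc
        rw [List.length_set] at hjlen
        by_cases hjpos : j = pos
        · subst hjpos
          rw [getD_set_ne l j _ _ (by omega), getD_set_self l j _ hl]
          exact hS c (by omega) (by omega) hcp hj0
        · rw [getD_set_ne l pos j _ (by omega)]
          by_cases hpj : (j - 1) / 2 = pos
          · rw [hpj, getD_set_self l pos _ hl]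
            exact hmin j (by omega) hj0 hpj
          · rw [getD_set_ne l pos _ _ (by omega)]
            exact hP j hj0 hjlen hjpos hpj
      have hS' : BridgeGe (l.set pos (l.getD c 0)) c := by
        intro j hjlen hj0 hpjc hc0
        rw [List.length_set] at hjlen
        rw [hcp, getD_set_self l pos _ hl, getD_set_ne l pos j _ (by omega)]
        have h2 := hP j hj0 hjlen (by omega) (by omega)
        rw [hpjc] at h2
        exact h2
      obtain ⟨e1, e2, e3, e4, e5, e6⟩ :=
        ih n c (l.set pos (l.getD c 0)) (by omega) (by rw [List.length_set]; omega) (by rw [List.length_set]; exact hn) hP' hS'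
      rw [List.length_set] at e1
      refine ⟨e1, e2, e3, e4, e5, ?_⟩
      intro d
      exact (e6 d).trans (move2 l pos c d hcpos (by omega))
    · rw [sul_eq_ge n l pos hc]
      exact ⟨rfl, hl, by simp only [hn]; exact hc, hP, hS, fun d => List.Perm.refl _⟩

theorem getD_append_left (l1 l2 : List Int) (j : Nat) (h : j < l1.length) :
    (l1 ++ l2).getD j 0 = l1.getD j 0 := by
  simp [List.getD_eq_getElem?_getD, List.getElem?_append_left h]

theorem heappush_perm (heap : List Int) (item : Int) : (pvHeappush heap item).Perm (heap ++ [item]) := by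
  unfold pvHeappush
  have h1 := sdl_perm item heap.length (heap ++ [item]) (by simp)
  have hget : (heap ++ [item]).getD heap.length 0 = item := by
    rw [List.getD_eq_getElem?_getD, List.getElem?_append_right (le_refl heap.length)]
    simp
  have h2 : (heap ++ [item]).set heap.length item = heap ++ [item] := by
    have h3 := set_getD_self (heap ++ [item]) heap.length (by simp only [List.length_append, List.length_cons, List.length_nil]; omega)
    rwa [hget] at h3
  rwa [h2] at h1

theorem heappush_heap (heap : List Int) (item : Int) (h : IsHeap heap) : IsHeap (pvHeappush heap item) := by
  unfold pvHeappush
  apply sdl_heap item heap.length (heap ++ [item]) (by simp)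
  · intro j hj0 hjlen hjne hjp
    have hjlen' : j < heap.length + 1 := by simpa using hjlen
    rw [getD_append_left _ _ _ (by omega), getD_append_left _ _ _ (by omega)]
    exact h j hj0 (by omega)
  · intro j hjlen hj0 hpj
    have : j < heap.length + 1 := by simpa using hjlen
    omega
  · intro j hjlen hj0 hpj hpos0
    have : j < heap.length + 1 := by simpa using hjlen
    omega

theorem heapreplace_heap (heap : List Int) (item : Int) (hne : heap ≠ []) (h : IsHeap heap) :
    IsHeap (pvHeapreplace heap item) := by
  have hlen : 0 < heap.length := List.length_pos_iff.mpr hne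
  unfold pvHeapreplace
  show IsHeap (pvSiftdownLoop (pvSiftupLoop (heap.set 0 item).length (heap.set 0 item) 0).1 item
    (pvSiftupLoop (heap.set 0 item).length (heap.set 0 item) 0).2)
  have hP0 : HeapExcept (heap.set 0 item) 0 := by
    intro j hj0 hjlen hjne hjp
    rw [List.length_set] at hjlen
    rw [getD_set_ne heap 0 _ _ (by omega), getD_set_ne heap 0 j _ (by omega)]
    exact h j hj0 hjlen
  have hS0 : BridgeGe (heap.set 0 item) 0 := by
    intro j _ _ _ hfalse
    exact absurd hfalse (lt_irrefl 0)
  obtain ⟨e1, e2, e3, e4, e5, e6⟩ :=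
    sul_spec (heap.set 0 item).length (heap.set 0 item).length 0 (heap.set 0 item)
      (by omega) (by rw [List.length_set]; exact hlen) rfl hP0 hS0
  apply sdl_heap item _ _ e2 e4 ?_ e5
  intro j hjlen hj0 hpj
  omega

theorem heapreplace_perm (heap : List Int) (item : Int) (hne : heap ≠ []) (h : IsHeap heap) :
    (pvHeapreplace heap item).Perm (item :: heap.tail) := by
  have hlen : 0 < heap.length := List.length_pos_iff.mpr hne
  unfold pvHeapreplace
  show (pvSiftdownLoop (pvSiftupLoop (heap.set 0 item).length (heap.set 0 item) 0).1 item
    (pvSiftupLoop (heap.set 0 item).length (heap.set 0 item) 0).2).Perm (item :: heap.tail)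
  have hP0 : HeapExcept (heap.set 0 item) 0 := by
    intro j hj0 hjlen hjne hjp
    rw [List.length_set] at hjlen
    rw [getD_set_ne heap 0 _ _ (by omega), getD_set_ne heap 0 j _ (by omega)]
    exact h j hj0 hjlen
  have hS0 : BridgeGe (heap.set 0 item) 0 := by
    intro j _ _ _ hfalse
    exact absurd hfalse (lt_irrefl 0)
  obtain ⟨e1, e2, e3, e4, e5, e6⟩ :=
    sul_spec (heap.set 0 item).length (heap.set 0 item).length 0 (heap.set 0 item)
      (by omega) (by rw [List.length_set]; exact hlen) rfl hP0 hS0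
  have hp := sdl_perm item _ _ e2
  have h6 := e6 item
  rw [List.set_set] at h6
  have h7 : heap.set 0 item = item :: heap.tail := by
    cases heap with
    | nil => exact absurd rfl hne
    | cons hd tl => rfl
  exact hp.trans (h6.trans (by rw [h7]))

theorem root_min (l : List Int) (h : IsHeap l) : ∀ x ∈ l, l.getD 0 0 ≤ x := by
  have key : ∀ j, j < l.length → l.getD 0 0 ≤ l.getD j 0 := by
    intro j
    induction j using Nat.strong_induction_on with
    | _ j ih =>
      intro hj
      rcases Nat.eq_zero_or_pos j with rfl | hj0
      · exact le_refl _
      · exact (ih ((j - 1) / 2) (by omega) (by omega)).trans (h j hj0 hj)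
  intro x hx
  obtain ⟨i, hi, rfl⟩ := List.mem_iff_getElem.mp hx
  have h2 : l.getD i 0 = l[i] := by
    rw [List.getD_eq_getElem?_getD, List.getElem?_eq_getElem hi]
    rfl
  exact h2 ▸ key i hi

theorem sortedId_perm (s : List Int) : (sortedId s).Perm s :=
  PySem.List.sorted_perm s (fun x => x) false

theorem sortedId_pairwise (s : List Int) : List.Pairwise (· ≤ ·) (sortedId s) := by
  simpa using PySem.List.sorted_pairwise s (fun x => x)

theorem sortedId_mem (s : List Int) (x : Int) : x ∈ sortedId s ↔ x ∈ s :=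
  PySem.List.mem_sorted s (fun x => x) false x

theorem sortedId_eq (xs ys : List Int) (h1 : ys.Perm xs) (h2 : List.Pairwise (· ≤ ·) ys) :
    sortedId xs = ys :=
  PySem.List.sorted_id_eq_of_perm_of_pairwise xs ys h1 (by simpa using h2)

theorem sortedId_congr {a b : List Int} (h : a.Perm b) : sortedId a = sortedId b :=
  sortedId_eq a (sortedId b) ((sortedId_perm b).trans h.symm) (sortedId_pairwise b)

theorem length_sortedId (a : List Int) : (sortedId a).length = a.length := by
  unfold sortedId
  exact PySem.List.length_sorted a (fun x => x) false

theorem top_insert_le (s : List Int) (num : Int) (K : Nat) (hlen : K ≤ s.length)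
    (hnum : ∀ y ∈ (sortedId s).drop (s.length - K), num ≤ y) :
    (sortedId (s ++ [num])).drop (s.length + 1 - K) = (sortedId s).drop (s.length - K) := by
  have hpu := sortedId_pairwise s
  have hu : sortedId s = (sortedId s).take (s.length - K) ++ (sortedId s).drop (s.length - K) :=
    (List.take_append_drop _ _).symm
  have hlena : ((sortedId s).take (s.length - K)).length = s.length - K := by
    rw [List.length_take, length_sortedId]; omega
  rw [hu] at hpu
  obtain ⟨hpa, hpt, hcross⟩ := List.pairwise_append.mp hpu
  have key : sortedId (s ++ [num]) = sortedId ((sortedId s).take (s.length - K) ++ [num]) ++ (sortedId s).drop (s.length - K) := by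
    apply sortedId_eq
    · have p1 := (sortedId_perm ((sortedId s).take (s.length - K) ++ [num])).append_right ((sortedId s).drop (s.length - K))
      refine p1.trans ?_
      have r1 : (((sortedId s).take (s.length - K) ++ [num]) ++ (sortedId s).drop (s.length - K)).Perm
          (((sortedId s).take (s.length - K) ++ (sortedId s).drop (s.length - K)) ++ [num]) := by
        rw [List.append_assoc, List.append_assoc]
        exact List.Perm.append_left _ List.perm_append_comm
      refine r1.trans ?_
      rw [← hu]
      exact (sortedId_perm s).append_right [num]
    · rw [List.pairwise_append]
      refine ⟨sortedId_pairwise _, hpt, ?_⟩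
      intro x hx y hy
      rw [sortedId_mem] at hx
      rcases List.mem_append.mp hx with hxa | hxn
      · exact hcross x hxa y hy
      · rw [List.mem_singleton] at hxn
        subst hxn
        exact hnum y hy
  rw [key, List.drop_left' (by rw [length_sortedId, List.length_append, hlena]; simp; omega)]

theorem top_insert_gt (s : List Int) (num : Int) (K : Nat) (hlen : K ≤ s.length)
    {m : Int} {ttail : List Int} (ht : (sortedId s).drop (s.length - K) = m :: ttail)
    (hgt : m < num) :
    (sortedId (s ++ [num])).drop (s.length + 1 - K) = sortedId (num :: ttail) := by
  have hpu := sortedId_pairwise s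
  have hu : sortedId s = (sortedId s).take (s.length - K) ++ (m :: ttail) := by
    rw [← ht]; exact (List.take_append_drop _ _).symm
  have hlena : ((sortedId s).take (s.length - K)).length = s.length - K := by
    rw [List.length_take, length_sortedId]; omega
  rw [hu] at hpu
  obtain ⟨hpa, hpt, hcross⟩ := List.pairwise_append.mp hpu
  have hmle : ∀ y ∈ ttail, m ≤ y := (List.pairwise_cons.mp hpt).1
  have key : sortedId (s ++ [num]) = ((sortedId s).take (s.length - K) ++ [m]) ++ sortedId (num :: ttail) := by
    apply sortedId_eq
    · have p1 := List.Perm.append_left ((sortedId s).take (s.length - K) ++ [m]) (sortedId_perm (num :: ttail))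
      refine p1.trans ?_
      have r0 : (m :: num :: ttail).Perm ((m :: ttail) ++ [num]) :=
        ((List.perm_append_singleton num ttail).symm.cons m)
      have r1 := List.Perm.append_left ((sortedId s).take (s.length - K)) r0
      have r2 : ((sortedId s).take (s.length - K)) ++ ((m :: ttail) ++ [num]) = (sortedId s) ++ [num] := by
        rw [← List.append_assoc, ← hu]
      have r3 : ((sortedId s) ++ [num]).Perm (s ++ [num]) := (sortedId_perm s).append_right [num]
      have r4 := r1.trans (r2 ▸ r3)
      simpa [List.append_assoc] using r4
    · rw [List.pairwise_append]
      refine ⟨?_, sortedId_pairwise _, ?_⟩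
      · rw [List.pairwise_append]
        refine ⟨hpa, List.pairwise_singleton _ _, ?_⟩
        intro x hx y hy
        rw [List.mem_singleton.mp hy]
        exact hcross x hx m List.mem_cons_self
      · intro x hx y hy
        rw [sortedId_mem] at hy
        rcases List.mem_append.mp hx with hxa | hxm
        · rcases List.mem_cons.mp hy with rfl | hyt
          · exact le_of_lt ((hcross x hxa m List.mem_cons_self).trans_lt hgt)
          · exact hcross x hxa y (List.mem_cons_of_mem m hyt)
        · rw [List.mem_singleton] at hxm
          subst hxm
          rcases List.mem_cons.mp hy with rfl | hyt
          · exact le_of_lt hgt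
          · exact hmle y hyt
  rw [key, List.drop_left' (by rw [List.length_append, hlena]; simp; omega)]

theorem step_inv (K : Nat) (hK : 0 < K) (s : List Int) (num : Int) (pq : List Int)
    (hH : IsHeap pq) (ht : sortedId pq = (sortedId s).drop (s.length - K)) :
    IsHeap (pvStep (K : Int) pq num) ∧
    sortedId (pvStep (K : Int) pq num) = (sortedId (s ++ [num])).drop (s.length + 1 - K) := by
  have hlpq : pq.length = s.length - (s.length - K) := by
    rw [← length_sortedId pq, ht, List.length_drop, length_sortedId]
  unfold pvStep
  by_cases hlt : (pq.length : Int) < (K : Int)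
  · rw [if_pos hlt]
    have hlt' : pq.length < K := by exact_mod_cast hlt
    have hsK : s.length < K := by omega
    have hdrop : s.length - K = 0 := by omega
    rw [hdrop, List.drop_zero] at ht
    have e1 : pq.Perm (sortedId pq) := (sortedId_perm pq).symm
    rw [ht] at e1
    have hpqs : pq.Perm s := e1.trans (sortedId_perm s)
    refine ⟨heappush_heap pq num hH, ?_⟩
    rw [show s.length + 1 - K = 0 by omega, List.drop_zero]
    exact sortedId_congr ((heappush_perm pq num).trans (hpqs.append_right [num]))
  · rw [if_neg hlt]
    have hlt' : ¬ pq.length < K := fun hcon => hlt (by exact_mod_cast hcon)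
    have hKs : K ≤ s.length := by omega
    have hpqK : pq.length = K := by omega
    obtain ⟨hd, tl, rfl⟩ : ∃ hd tl, pq = hd :: tl := by
      cases pq with
      | nil => simp at hpqK; omega
      | cons hd tl => exact ⟨hd, tl, rfl⟩
    have hget : PySem.List.pyGetD (hd :: tl) 0 0 = hd := by
      rw [PySem.List.pyGetD_zero]; rfl
    rw [hget]
    obtain ⟨m, ttail, hmt⟩ : ∃ m ttail, sortedId (hd :: tl) = m :: ttail := by
      cases hsi : sortedId (hd :: tl) with
      | nil =>
        have hc := length_sortedId (hd :: tl)
        rw [hsi] at hc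
        simp at hc
      | cons m ttail => exact ⟨m, ttail, rfl⟩
    have hhdm : hd = m := by
      have h1 : hd ≤ m := by
        have hm : m ∈ hd :: tl := (sortedId_mem (hd :: tl) m).mp (hmt ▸ List.mem_cons_self)
        have := root_min (hd :: tl) hH m hm
        simpa using this
      have h2 : m ≤ hd := PySem.List.key_head_sorted_le (hd :: tl) (fun x => x) hmt hd List.mem_cons_self
      exact le_antisymm h1 h2
    have htm : (sortedId s).drop (s.length - K) = m :: ttail := by rw [← ht]; exact hmt
    by_cases hnum : hd < num
    · rw [if_pos hnum]
      refine ⟨heapreplace_heap _ num (by simp) hH, ?_⟩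
      have hpq : (hd :: tl).Perm (m :: ttail) := by
        rw [← hmt]; exact (sortedId_perm _).symm
      rw [hhdm] at hpq
      have htlt : tl.Perm ttail := hpq.cons_inv
      have hperm : (pvHeapreplace (hd :: tl) num).Perm (num :: ttail) :=
        (heapreplace_perm _ num (by simp) hH).trans (by simpa using htlt.cons num)
      rw [sortedId_congr hperm, top_insert_gt s num K hKs htm (hhdm ▸ hnum)]
    · rw [if_neg hnum]
      refine ⟨hH, ?_⟩
      rw [top_insert_le s num K hKs ?_]
      · exact ht
      · intro y hy
        rw [← ht, sortedId_mem] at hy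
        have h1 := root_min (hd :: tl) hH y hy
        simp only [List.getD_cons_zero] at h1
        exact (not_lt.mp hnum).trans h1

theorem fold_inv (K : Nat) (hK : 0 < K) : ∀ (c : List Int) (pq s : List Int),
    IsHeap pq → sortedId pq = (sortedId s).drop (s.length - K) →
    IsHeap (c.foldl (pvStep (K : Int)) pq) ∧
    sortedId (c.foldl (pvStep (K : Int)) pq) = (sortedId (s ++ c)).drop ((s ++ c).length - K) := by
  intro c
  induction c with
  | nil =>
    intro pq s hH ht
    simpa using ⟨hH, ht⟩
  | cons num c ih =>
    intro pq s hH ht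
    obtain ⟨h1, h2⟩ := step_inv K hK s num pq hH ht
    have h3 := ih (pvStep (K : Int) pq num) (s ++ [num]) h1 (by simpa using h2)
    simpa using h3

theorem A_fold_flatten (M : Int) (lists : List (List Int)) :
    lists.foldl (fun pq lst => (PySem.List.slice lst none (some M)).foldl (pvStep M) pq) [] =
    ((lists.map (fun lst => PySem.List.slice lst none (some M))).flatten).foldl (pvStep M) [] := by
  rw [List.foldl_flatten, List.foldl_map]

theorem B_cand_flatten (M : Int) (lists : List (List Int)) :
    lists.foldl (fun cand lst => cand ++ PySem.List.slice lst none (some M)) [] =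
    (lists.map (fun lst => PySem.List.slice lst none (some M))).flatten := by
  rw [PySem.List.foldl_append_eq_flatMap]
  simp [List.flatMap_def]

theorem sortedId_nil : sortedId [] = [] := rfl

-- ===== VERDICT (by name: the statement is the Claim_ definition above) =====
theorem find_largest_m_elements_reverse_sorted_spec : Claim_equal_find_largest_m_elements_reverse_sorted := by
  intro lists M _ hPre
  unfold Spec_find_largest_m_elements_reverse_sorted
  unfold find_largest_m_elements_reverse_sorted find_largest_m_elements_reverse_sorted_alt
  rw [A_fold_flatten, B_cand_flatten]
  by_cases hM : 0 < M
  · have hMK : M = ((M.toNat : Nat) : Int) := by omega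
    have h0 : IsHeap ([] : List Int) := by intro j hj0 hjlen; simp at hjlen
    have hbase : sortedId ([] : List Int) = (sortedId ([] : List Int)).drop (([] : List Int).length - M.toNat) := by
      rw [sortedId_nil]; simp
    rw [hMK]
    obtain ⟨_, hfold⟩ := fold_inv M.toNat (by omega)
      ((lists.map (fun lst => PySem.List.slice lst none (some ((M.toNat : Nat) : Int)))).flatten) [] [] h0 hbase
    simp only [List.nil_append] at hfold
    show sortedId _ = PySem.List.slice (sortedId _) (some (-((M.toNat : Nat) : Int))) none
    rw [hfold, PySem.List.slice_from_neg_natCast _ M.toNat (by omega), length_sortedId]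
  · have hg : ∀ lst ∈ lists, PySem.List.slice lst none (some M) = [] := by
      intro lst hl
      rcases eq_or_lt_of_le (not_lt.mp hM) with hM0 | hMneg
      · rw [hM0, PySem.List.slice_to lst (le_refl 0)]
        simp
      · have hb : (lst.length : Int) ≤ -M := by
          rcases hPre with h | h
          · omega
          · exact h lst hl
        have hMk : M = -(((-M).toNat : Nat) : Int) := by omega
        rw [hMk, PySem.List.slice_to_neg_natCast lst _ (by omega)]
        rw [show lst.length - (-M).toNat = 0 by omega, List.take_zero]
    have hcand : (lists.map (fun lst => PySem.List.slice lst none (some M))).flatten = [] := by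
      rw [List.flatten_eq_nil_iff]
      intro l hl
      obtain ⟨lst, hlst, rfl⟩ := List.mem_map.mp hl
      exact hg lst hlst
    rw [hcand]
    show sortedId [] = PySem.List.slice (sortedId []) (some (-M)) none
    rw [sortedId_nil, PySem.List.slice_some_none]
    simp
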